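-- pv_equiv track=rewrite | github.com/psychopatz/ModManager | DynamicTradingManager/backend/ItemManagement/pricing/tag_utils.py | expand_hierarchy
-- ===== SOURCE A (Python) =====
-- from typing import Any, Dict, Iterable, List
--
-- def expand_hierarchy(tags: Iterable[str]) -> List[str]:
--     out: list[str] = []
--     seen: set[str] = set()
--     for tag in tags:
--         probe = str(tag or "")
--         while probe:
--             if probe not in seen:
--                 out.append(probe)
--                 seen.add(probe)
--             if "." not in probe:
--                 break
--             probe = probe.rsplit(".", 1)[0]
--     return out
-- ===== SOURCE B (Python) =====
-- def expand_hierarchy(tags):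
--     # Stage 1: for each tag, build its ancestor chain by forward accumulation
--     # (growing prefix joined with '.'), longest first; collect all candidates.
--     candidates = []
--     for tag in tags:
--         acc = []
--         cur = None
--         for part in str(tag or "").split("."):
--             cur = part if cur is None else cur + "." + part
--             if cur:
--                 acc.append(cur)
--         candidates.extend(reversed(acc))
--     # Stage 2: one global order-preserving dedup.
--     return list(dict.fromkeys(candidates))
-- ===== Notes on version B (the rewrite author's own statement) =====
-- stated objective: alternative
-- what changed: B is a two-stage pipeline: it first generates every tag's ancestor chain by splitting once on '.' and growing the prefix forward by concatenation (reversed to longest-first), collecting all candidates, then performs one global order-preserving dedup with dict.fromkeys; A interleaves dedup with repeated rsplit suffix-stripping in a single online pass.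
import Mathlib
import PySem

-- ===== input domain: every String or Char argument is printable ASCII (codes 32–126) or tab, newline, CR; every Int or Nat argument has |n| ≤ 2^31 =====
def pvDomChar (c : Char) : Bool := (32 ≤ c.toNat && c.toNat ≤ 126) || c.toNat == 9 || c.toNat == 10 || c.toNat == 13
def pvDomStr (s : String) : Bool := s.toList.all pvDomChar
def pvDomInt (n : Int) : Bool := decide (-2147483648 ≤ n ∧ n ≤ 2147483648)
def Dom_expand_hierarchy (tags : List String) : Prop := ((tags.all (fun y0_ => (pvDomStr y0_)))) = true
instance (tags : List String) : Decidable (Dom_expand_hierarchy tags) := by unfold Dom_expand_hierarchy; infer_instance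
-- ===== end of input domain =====

-- B is a two-stage pipeline — generate every tag's ancestor chain by one split plus forward
-- prefix concatenation, then one global ordered dedup (dict.fromkeys) — instead of A's single
-- online pass of repeated rsplit stripping with a seen-set (objective: alternative, same cost).

-- ===== PORT A =====

-- hand port of probe.rsplit(".", 1)[0]: drop the trailing run of non-dots and the dot before it;
-- exact whenever '.' occurs in probe (A only reaches this expression in that case)
def pvRsplitHead (probe : List Char) : List Char :=
  ((probe.reverse.dropWhile (fun c => c != '.')).drop 1).reverse

theorem pvRsplitHead_length_lt (probe : List Char) (hne : probe ≠ []) :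
    (pvRsplitHead probe).length < probe.length := by
  have h1 : (probe.reverse.dropWhile (fun c => c != '.')).length ≤ probe.length := by
    simpa using List.length_dropWhile_le (fun c => c != '.') probe.reverse
  have h2 : 0 < probe.length := List.length_pos_iff.mpr hne
  simp only [pvRsplitHead, List.length_reverse, List.length_drop]
  omega

-- the 'while probe:' loop of A, state = (out, seen)
def pvAWhile (probe : List Char) (out : List (List Char)) (seen : PySem.Set (List Char)) :
    List (List Char) × PySem.Set (List Char) :=
  if hstop : probe = [] then (out, seen)  -- hstop feeds the termination proof
  else
    let st := if seen.contains probe then (out, seen) else (out ++ [probe], seen.add probe)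
    if PySem.Chars.isIn ['.'] probe then pvAWhile (pvRsplitHead probe) st.1 st.2
    else st
termination_by probe.length
decreasing_by exact pvRsplitHead_length_lt probe hstop

-- probe = str(tag or "") is tag itself for a string argument (empty stays empty)
def expand_hierarchy (tags : List String) : List String :=
  (tags.foldl (fun st tag => pvAWhile tag.toList st.1 st.2)
      (([] : List (List Char)), (PySem.Set.empty : PySem.Set (List Char)))).1.map String.ofList

-- ===== PORT B =====

-- body of B's inner loop: cur = part if cur is None else cur + "." + part; append if nonempty
def pvChainStep (st : Option (List Char) × List (List Char)) (part : List Char) :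
    Option (List Char) × List (List Char) :=
  let cur := match st.1 with
    | none => part
    | some c => c ++ '.' :: part
  (some cur, if cur.isEmpty then st.2 else st.2 ++ [cur])

-- ancestor chain of one tag: split once on '.', accumulate growing prefixes, reverse.
-- str.split(".") with the one-character separator is ported as the corresponding Lean
-- function List.splitOn '.' (exact: "".split(".") = [""] = splitOn on []).
def pvChain (tag : List Char) : List (List Char) :=
  (((tag.splitOn '.').foldl pvChainStep (none, [])).2).reverse

-- stage 1 collects candidates; stage 2 is list(dict.fromkeys(...)) = PySem.List.dedup
def expand_hierarchy_alt (tags : List String) : List String :=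
  (PySem.List.dedup
    (tags.foldl (fun cs tag => cs ++ pvChain tag.toList) ([] : List (List Char)))).map
    String.ofList

-- ===== PRECONDITION & SPEC =====
def Spec_expand_hierarchy (tags : List String) (out : List String) : Prop := out = expand_hierarchy_alt tags
instance (tags : List String) (out : List String) : Decidable (Spec_expand_hierarchy tags out) := by unfold Spec_expand_hierarchy; infer_instance

-- ===== CLAIM (what is proved, stated in full; the proofs are below) =====
def Claim_equal_expand_hierarchy : Prop := ∀ (tags : List String), Dom_expand_hierarchy tags → Spec_expand_hierarchy tags (expand_hierarchy tags)

-- ===== LEMMAS AND PROOFS =====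

-- the sequence of probes A's while-loop visits (independent of out/seen)
def pvProbes (probe : List Char) : List (List Char) :=
  if hstop : probe = [] then []
  else probe :: (if PySem.Chars.isIn ['.'] probe then pvProbes (pvRsplitHead probe) else [])
termination_by probe.length
decreasing_by exact pvRsplitHead_length_lt probe hstop

-- A's dedup step, one candidate at a time
def pvDedupStep (st : List (List Char) × PySem.Set (List Char)) (x : List Char) :
    List (List Char) × PySem.Set (List Char) :=
  if st.2.contains x then st else (st.1 ++ [x], st.2.add x)

theorem pvAWhile_eq_foldl_probes (n : Nat) : ∀ (probe : List Char), probe.length ≤ n →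
    ∀ (out : List (List Char)) (seen : PySem.Set (List Char)),
    pvAWhile probe out seen = (pvProbes probe).foldl pvDedupStep (out, seen) := by
  induction n with
  | zero =>
    intro probe hlen out seen
    have : probe = [] := List.eq_nil_of_length_eq_zero (by omega)
    subst this
    rw [pvAWhile, pvProbes]; simp
  | succ n ih =>
    intro probe hlen out seen
    by_cases hne : probe = []
    · subst hne; rw [pvAWhile, pvProbes]; simp
    · rw [pvAWhile, pvProbes, dif_neg hne, dif_neg hne]
      by_cases hdot : PySem.Chars.isIn ['.'] probe = true
      · rw [if_pos hdot, if_pos hdot]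
        simp only [List.foldl_cons]
        have hlt := pvRsplitHead_length_lt probe hne
        rw [ih (pvRsplitHead probe) (by omega)]
        rfl
      · rw [if_neg hdot, if_neg hdot]
        simp only [List.foldl_cons, List.foldl_nil]
        rfl

-- on mirrored states (out = seen as lists) pvDedupStep is Set.add on both sides
theorem pvFoldl_dedupStep_mirror (xs : List (List Char)) (l : List (List Char)) :
    xs.foldl pvDedupStep (l, l) = (xs.foldl PySem.Set.add l, xs.foldl PySem.Set.add l) := by
  induction xs generalizing l with
  | nil => rfl
  | cons x xs ih =>
    simp only [List.foldl_cons]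
    have hstep : pvDedupStep (l, l) x = (PySem.Set.add l x, PySem.Set.add l x) := by
      simp only [pvDedupStep, PySem.Set.add]
      by_cases hm : x ∈ l <;> simp [hm]
    rw [hstep, ih]

-- A's outer fold = dedup-fold over the flattened probe chains
theorem pvA_eq_dedup_flat (tags : List String) :
    (tags.foldl (fun st tag => pvAWhile tag.toList st.1 st.2)
        (([] : List (List Char)), (PySem.Set.empty : PySem.Set (List Char)))).1
      = PySem.List.dedup (tags.flatMap (fun tag => pvProbes tag.toList)) := by
  have key : ∀ (ts : List String) (l : List (List Char)),
      ts.foldl (fun st tag => pvAWhile tag.toList st.1 st.2) (l, l)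
        = ((ts.flatMap (fun tag => pvProbes tag.toList)).foldl PySem.Set.add l,
           (ts.flatMap (fun tag => pvProbes tag.toList)).foldl PySem.Set.add l) := by
    intro ts
    induction ts with
    | nil => intro l; simp
    | cons t ts ih =>
      intro l
      simp only [List.foldl_cons, List.flatMap_cons, List.foldl_append]
      rw [pvAWhile_eq_foldl_probes t.toList.length t.toList le_rfl, pvFoldl_dedupStep_mirror]
      exact ih _
  rw [show (PySem.Set.empty : PySem.Set (List Char)) = ([] : List (List Char)) from rfl]
  rw [key tags []]
  rw [PySem.List.dedup_eq_ofList, PySem.Set.ofList_eq_foldl]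

-- ===== the per-tag chains agree =====

-- every piece of splitOn is separator-free
theorem pvSplitOn_no_sep (tag : List Char) : ∀ p ∈ tag.splitOn '.', '.' ∉ p := by
  have key : ∀ (l : List Char), ∀ p ∈ l.splitOnP (fun c => c == '.'), ∀ c ∈ p, ¬ (c == '.') = true := by
    intro l
    induction l with
    | nil =>
      intro p hp c hc
      rw [List.splitOnP_nil, List.mem_singleton] at hp
      subst hp; simp at hc
    | cons a l ih =>
      intro p hp c hc
      rw [List.splitOnP_cons] at hp
      by_cases ha : (a == '.') = true
      · rw [if_pos ha] at hp
        rcases List.mem_cons.mp hp with h | h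
        · subst h; simp at hc
        · exact ih p h c hc
      · rw [if_neg ha] at hp
        rcases hl : l.splitOnP (fun c => c == '.') with _ | ⟨q, qs⟩
        · exact absurd hl (List.splitOnP_ne_nil _ _)
        · rw [hl] at hp
          simp only [List.modifyHead] at hp
          rcases List.mem_cons.mp hp with h | h
          · subst h
            rcases List.mem_cons.mp hc with h2 | h2
            · subst h2; exact ha
            · exact ih q (by rw [hl]; exact List.mem_cons_self) c h2
          · exact ih p (by rw [hl]; exact List.mem_cons_of_mem _ h) c hc
  intro p hp hc
  exact key tag p hp '.' hc (by simp)

theorem pvIntercalate_append_singleton (qs : List (List Char)) (p : List Char) (h : qs ≠ []) :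
    ['.'].intercalate (qs ++ [p]) = ['.'].intercalate qs ++ '.' :: p := by
  induction qs with
  | nil => exact absurd rfl h
  | cons q qs ih =>
    rcases qs with _ | ⟨q', qs'⟩
    · simp [List.intercalate, List.intersperse]
    · have h1 : (q :: q' :: qs') ++ [p] = q :: ((q' :: qs') ++ [p]) := rfl
      rw [h1]
      have h2 : ∀ (y : List Char) (ys : List (List Char)),
          ['.'].intercalate (q :: y :: ys) = q ++ '.' :: ['.'].intercalate (y :: ys) := by
        intro y ys; simp [List.intercalate, List.intersperse]
      rcases hq : (q' :: qs') ++ [p] with _ | ⟨y, ys⟩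
      · simp at hq
      · rw [h2 y ys, ← hq, ih (by simp), h2 q' qs']
        simp

-- rsplit on the last dot undoes appending '.'::p (p separator-free)
theorem pvRsplitHead_append (j p : List Char) (hp : '.' ∉ p) :
    pvRsplitHead (j ++ '.' :: p) = j := by
  unfold pvRsplitHead
  have hrev : (j ++ '.' :: p).reverse = p.reverse ++ [('.' : Char)] ++ j.reverse := by
    simp
  rw [hrev]
  have hnil : p.reverse.dropWhile (fun c => c != '.') = [] := by
    rw [List.dropWhile_eq_nil_iff]
    intro c hc
    simp only [bne_iff_ne, ne_eq] at *
    intro hcd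
    exact hp (by rw [← hcd]; exact List.mem_reverse.mp hc)
  have h2 : (p.reverse ++ [('.' : Char)]).dropWhile (fun c => c != '.') = ['.'] := by
    rw [List.dropWhile_append, hnil]
    simp
  rw [List.dropWhile_append, h2]
  simp

-- first component of B's inner fold = the joined prefix so far
theorem pvChainFold_fst (ps : List (List Char)) (h : ps ≠ []) :
    ((ps.foldl pvChainStep (none, ([] : List (List Char))))).1 = some (['.'].intercalate ps) := by
  induction ps using List.reverseRecOn with
  | nil => exact absurd rfl h
  | append_singleton qs p ih =>
    rw [List.foldl_append, List.foldl_cons, List.foldl_nil]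
    by_cases hq : qs = []
    · subst hq; simp [pvChainStep, List.intercalate]
    · rcases hfold : qs.foldl pvChainStep (none, ([] : List (List Char))) with ⟨fst, snd⟩
      have h1 : fst = some (['.'].intercalate qs) := by
        have := ih hq; rw [hfold] at this; exact this
      subst h1
      simp only [pvChainStep]
      rw [pvIntercalate_append_singleton qs p hq]

-- main per-tag lemma: A's probe chain = B's reversed accumulator, over the parts list
theorem pvProbes_eq_chainFold (ps : List (List Char)) (hps : ∀ p ∈ ps, '.' ∉ p) :
    pvProbes (['.'].intercalate ps)
      = ((ps.foldl pvChainStep (none, ([] : List (List Char))))).2.reverse := by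
  induction ps using List.reverseRecOn with
  | nil => rw [pvProbes]; simp [List.intercalate]
  | append_singleton qs p ih =>
    rw [List.foldl_append, List.foldl_cons, List.foldl_nil]
    by_cases hq : qs = []
    · -- single part: no dot in it
      subst hq
      simp only [List.nil_append] at hps ⊢
      have hp : '.' ∉ p := hps p (by simp)
      have hJ : ['.'].intercalate [p] = p := by simp [List.intercalate]
      rw [hJ]
      simp only [List.foldl_nil, pvChainStep]
      by_cases hpe : p = []
      · subst hpe; rw [pvProbes]; simp
      · rw [pvProbes, dif_neg hpe]
        have hdot : PySem.Chars.isIn ['.'] p = false := by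
          rw [PySem.Chars.isIn_eq_false_iff]
          intro hinf
          exact hp ((List.singleton_infix_iff '.' p).mp hinf)
        rw [hdot]
        simp [hpe]
    · -- qs ++ [p], qs ≠ []
      have hqs' : ∀ x ∈ qs, '.' ∉ x := fun x hx => hps x (List.mem_append_left _ hx)
      have hp : '.' ∉ p := hps p (List.mem_append_right _ (by simp))
      rcases hfold : qs.foldl pvChainStep (none, ([] : List (List Char))) with ⟨fst, snd⟩
      have h1 : fst = some (['.'].intercalate qs) := by
        have := pvChainFold_fst qs hq; rw [hfold] at this; exact this
      subst h1
      have hJ : ['.'].intercalate (qs ++ [p]) = ['.'].intercalate qs ++ '.' :: p :=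
        pvIntercalate_append_singleton qs p hq
      simp only [pvChainStep]
      rw [hJ]
      have hne : ['.'].intercalate qs ++ '.' :: p ≠ [] := by simp
      have hmem : ('.' : Char) ∈ ['.'].intercalate qs ++ '.' :: p := by simp
      have hdot : PySem.Chars.isIn ['.'] (['.'].intercalate qs ++ '.' :: p) = true := by
        rw [PySem.Chars.isIn_iff_infix]
        exact (List.singleton_infix_iff _ _).mpr hmem
      rw [pvProbes, dif_neg hne, hdot, if_pos rfl,
        pvRsplitHead_append (['.'].intercalate qs) p hp]
      have hie : (['.'].intercalate qs ++ '.' :: p).isEmpty = false := by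
        simp
      rw [hie]
      simp only [Bool.false_eq_true, if_false, List.reverse_append, List.reverse_cons,
        List.reverse_nil, List.nil_append, List.singleton_append]
      have := ih hqs'
      rw [hfold] at this
      simp only at this
      rw [← this]

theorem pvProbes_eq_pvChain (tag : List Char) : pvProbes tag = pvChain tag := by
  unfold pvChain
  have h1 : ['.'].intercalate (tag.splitOn '.') = tag := List.intercalate_splitOn tag '.'
  have := pvProbes_eq_chainFold (tag.splitOn '.') (pvSplitOn_no_sep tag)
  rw [h1] at this
  exact this

-- B's candidate-building fold is the flatMap of chains
theorem pvB_candidates (tags : List String) (acc : List (List Char)) :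
    tags.foldl (fun cs tag => cs ++ pvChain tag.toList) acc
      = acc ++ tags.flatMap (fun tag => pvChain tag.toList) := by
  induction tags generalizing acc with
  | nil => simp
  | cons t ts ih => simp [List.foldl_cons, ih, List.flatMap_cons]

-- ===== VERDICT (by name: the statement is the Claim_ definition above) =====
theorem expand_hierarchy_spec : Claim_equal_expand_hierarchy := by
  intro tags _
  unfold Spec_expand_hierarchy expand_hierarchy expand_hierarchy_alt
  rw [pvA_eq_dedup_flat, pvB_candidates, List.nil_append]
  simp only [pvProbes_eq_pvChain]
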